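-- pv_equiv track=rewrite | github.com/OlyaKle/hello-world | aisd5.py | thief
-- ===== SOURCE A (Python) =====
-- def thief(a, n, m, k):
--     itog = ([], 0)
--     sum_i = 0  # количество унесённых элементов
--     cur_m = 0  # текущее количество заходов
--     cur_mm = 0  # текущее количество заходов
--     max_sum = 0  # текущая сумма унесённых элементов
--     maximum = 0  # максимальная сумма, за счет которой мы определим конечный массив весов
--     res = []  # экспонаты, которые вор смог унести
--     ch = 0
--     for i in a:
--         if i <= k:
--             if sum_i < n and cur_m < m:
--                 res.append(i)
--                 cur_m += 1
--                 sum_i += 1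
--                 max_sum += i
--         elif i > k:
--             if sum_i < n and cur_m < m:
--                 while ch < i and cur_mm < (m - cur_m):
--                     ch += k
--                     cur_mm += 1
--                 if i - ch == 0:
--                     sum_i += 1
--                     cur_m += cur_mm
--                     res.append(i)
--                     max_sum += i
--                 cur_mm = 0
--                 ch = 0
--     if max_sum > maximum:
--         maximum = max(maximum, max_sum)
--         itog = (res, maximum)
--     return (itog)
-- ===== SOURCE B (Python) =====
-- def thief(a, n, m, k):
--     # Staged: precompute each item's trip cost arithmetically (None = can't be
--     # carried), then one budget-consuming scan with break; total summed at the end.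
--     costs = [1 if i <= k else (i // k if i % k == 0 else None) for i in a]
--     res = []
--     cap, trips = n, m
--     for i, c in zip(a, costs):
--         if cap <= 0 or trips <= 0:
--             break
--         if c is not None and c <= trips:
--             res.append(i)
--             cap -= 1
--             trips -= c
--     total = sum(res)
--     return (res, total) if total > 0 else ([], 0)
-- ===== Notes on version B (the rewrite author's own statement) =====
-- stated objective: alternative
-- what changed: B is staged: a comprehension precomputes each item's trip cost arithmetically (i // k, None if not a multiple of k) replacing A's ch-stepping while-loop, then a single budget-consuming scan with break selects items and the total is summed at the end instead of accumulated.
-- outside the precondition, e.g. on thief([3], 1, 1, -3): A returns ([], 0), B returns ([3], 3); on thief([5], 1, 3, 0): A returns ([], 0), B raises ZeroDivisionError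
import Mathlib
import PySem

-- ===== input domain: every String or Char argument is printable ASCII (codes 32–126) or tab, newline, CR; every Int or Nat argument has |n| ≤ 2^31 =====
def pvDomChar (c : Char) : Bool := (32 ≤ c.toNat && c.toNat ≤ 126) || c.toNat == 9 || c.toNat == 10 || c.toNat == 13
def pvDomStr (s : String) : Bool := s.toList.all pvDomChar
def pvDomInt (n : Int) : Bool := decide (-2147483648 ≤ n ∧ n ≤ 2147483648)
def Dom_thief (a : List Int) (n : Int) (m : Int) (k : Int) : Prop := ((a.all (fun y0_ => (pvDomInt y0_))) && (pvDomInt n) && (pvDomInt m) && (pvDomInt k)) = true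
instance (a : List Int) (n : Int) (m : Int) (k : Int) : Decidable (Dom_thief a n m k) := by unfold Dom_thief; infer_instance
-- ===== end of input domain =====

-- B precomputes each item's trip cost arithmetically (replacing A's ch-stepping while-loop)
-- and then selects items in one budget-consuming scan, summing the total at the end.

-- ===== PORT A =====
-- the inner 'while ch < i and cur_mm < bound: ch += k; cur_mm += 1' loop of A (bound = m - cur_m)
def thiefInner (i k bound : Int) (ch cur_mm : Int) : Int × Int :=
  if ch < i ∧ cur_mm < bound then thiefInner i k bound (ch + k) (cur_mm + 1) else (ch, cur_mm)
termination_by (bound - cur_mm).toNat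
decreasing_by omega

-- one iteration of A's for-loop; state = (sum_i, cur_m, res, max_sum)
def thiefStepA (n m k : Int) (s : Int × Int × List Int × Int) (i : Int) : Int × Int × List Int × Int :=
  if i ≤ k then
    if s.1 < n ∧ s.2.1 < m then (s.1 + 1, s.2.1 + 1, s.2.2.1 ++ [i], s.2.2.2 + i) else s
  else
    if s.1 < n ∧ s.2.1 < m then
      let r := thiefInner i k (m - s.2.1) 0 0
      if i - r.1 = 0 then (s.1 + 1, s.2.1 + r.2, s.2.2.1 ++ [i], s.2.2.2 + i) else s
    else s

def thief (a : List Int) (n : Int) (m : Int) (k : Int) : List Int × Int :=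
  let st := a.foldl (thiefStepA n m k) (0, 0, [], 0)
  if st.2.2.2 > 0 then (st.2.2.1, st.2.2.2) else ([], 0)

-- ===== PORT B =====
-- trip cost of one item: '1 if i <= k else (i // k if i % k == 0 else None)'
def thiefCost (k i : Int) : Option Int :=
  if i ≤ k then some 1
  else if PySem.Int.mod i k = 0 then some (PySem.Int.floordiv i k) else none

-- B's budget-consuming scan over the zipped (item, cost) list; 'break' = return what was built
def thiefPick : List (Int × Option Int) → Int → Int → List Int
  | [], _, _ => []
  | (i, c) :: rest, cap, trips =>
    if cap ≤ 0 ∨ trips ≤ 0 then []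
    else
      match c with
      | some cv =>
          if cv ≤ trips then i :: thiefPick rest (cap - 1) (trips - cv)
          else thiefPick rest cap trips
      | none => thiefPick rest cap trips

def thief_alt (a : List Int) (n : Int) (m : Int) (k : Int) : List Int × Int :=
  let costs := a.map (thiefCost k)
  let res := thiefPick (a.zip costs) n m
  let total := res.sum
  if total > 0 then (res, total) else ([], 0)

-- ===== PRECONDITION & SPEC =====
-- Pre_ restricts to positive per-trip capacity k (the problem's natural domain); for k ≤ 0,
-- on which A still returns, A's inner-loop behaviour is an implementation artefact and B's
-- i % k arithmetic raises for k = 0 or differs for k < 0.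
def Pre_thief (a : List Int) (n : Int) (m : Int) (k : Int) : Prop := 1 ≤ k
instance (a : List Int) (n : Int) (m : Int) (k : Int) : Decidable (Pre_thief a n m k) := by unfold Pre_thief; infer_instance
def pvWitness_thief : List Int × Int × Int × Int := ([2, 6, 1], 3, 5, 3)

def Spec_thief (a : List Int) (n : Int) (m : Int) (k : Int) (out : List Int × Int) : Prop := out = thief_alt a n m k
instance (a : List Int) (n : Int) (m : Int) (k : Int) (out : List Int × Int) : Decidable (Spec_thief a n m k out) := by unfold Spec_thief; infer_instance

-- ===== CLAIM (what is proved, stated in full; the proofs are below) =====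
def Claim_equal_thief : Prop := ∀ (a : List Int) (n : Int) (m : Int) (k : Int), Dom_thief a n m k → Pre_thief a n m k → Spec_thief a n m k (thief a n m k)

-- ===== LEMMAS AND PROOFS =====

-- the inner loop preserves ch = k * cur_mm and cur_mm ≤ bound
theorem thiefInner_invariant (i k bound : Int) (mm : Int) (hmm : mm ≤ bound) :
    thiefInner i k bound (k * mm) mm = (k * (thiefInner i k bound (k * mm) mm).2, (thiefInner i k bound (k * mm) mm).2) ∧
    (thiefInner i k bound (k * mm) mm).2 ≤ bound := by
  rw [thiefInner]
  split
  · next h =>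
    have := thiefInner_invariant i k bound (mm + 1) (by omega)
    rw [show k * mm + k = k * (mm + 1) by ring]
    exact this
  · simpa using hmm
termination_by (bound - mm).toNat
decreasing_by omega

theorem thiefInner_invariant0 (i k bound : Int) (hb : 0 ≤ bound) :
    thiefInner i k bound 0 0 = (k * (thiefInner i k bound 0 0).2, (thiefInner i k bound 0 0).2) ∧
    (thiefInner i k bound 0 0).2 ≤ bound := by
  have := thiefInner_invariant i k bound 0 hb
  simpa using this

-- if i = k * q with 0 < q ≤ bound and 1 ≤ k, the loop reaches exactly ch = i with cur_mm = q
theorem thiefInner_hits (i k bound q : Int) (hk : 1 ≤ k) (hq : i = k * q) (hqb : q ≤ bound)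
    (mm : Int) (hmm : mm ≤ q) : thiefInner i k bound (k * mm) mm = (i, q) := by
  rw [thiefInner]
  rcases lt_or_ge mm q with h | h
  · have hlt : k * mm < i := by rw [hq]; nlinarith
    rw [if_pos ⟨hlt, by omega⟩, show k * mm + k = k * (mm + 1) by ring]
    exact thiefInner_hits i k bound q hk hq hqb (mm + 1) (by omega)
  · have hmq : mm = q := le_antisymm hmm h
    subst hmq
    rw [if_neg (by rw [← hq]; omega)]
    rw [hq]
termination_by (q - mm).toNat
decreasing_by omega

theorem thiefInner_hits0 (i k bound q : Int) (hk : 1 ≤ k) (hq : i = k * q) (h0 : 0 ≤ q)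
    (hqb : q ≤ bound) : thiefInner i k bound 0 0 = (i, q) := by
  have := thiefInner_hits i k bound q hk hq hqb 0 h0
  simpa using this

-- thiefPick returns [] once a budget is exhausted
theorem thiefPick_exhausted (l : List (Int × Option Int)) (cap trips : Int)
    (h : cap ≤ 0 ∨ trips ≤ 0) : thiefPick l cap trips = [] := by
  cases l with
  | nil => rfl
  | cons p rest => obtain ⟨i, c⟩ := p; simp only [thiefPick]; rw [if_pos h]

-- the main invariant: A's fold on an arbitrary state leaves res and max_sum equal to
-- the old values extended by B's pick on the remaining budgets
theorem foldA_pick (n m k : Int) (hk : 1 ≤ k) (a : List Int) :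
    ∀ (si cm : Int) (r : List Int) (ms : Int),
    (a.foldl (thiefStepA n m k) (si, cm, r, ms)).2.2.1
      = r ++ thiefPick (a.zip (a.map (thiefCost k))) (n - si) (m - cm) ∧
    (a.foldl (thiefStepA n m k) (si, cm, r, ms)).2.2.2
      = ms + (thiefPick (a.zip (a.map (thiefCost k))) (n - si) (m - cm)).sum := by
  induction a with
  | nil => intro si cm r ms; simp [thiefPick]
  | cons i xs ih =>
    intro si cm r ms
    simp only [List.map_cons, List.zip_cons_cons, List.foldl_cons]
    by_cases hcap : si < n ∧ cm < m
    · have hnb : ¬ (n - si ≤ 0 ∨ m - cm ≤ 0) := by omega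
      by_cases hik : i ≤ k
      · -- small item: cost 1, always affordable
        have hstep : thiefStepA n m k (si, cm, r, ms) i
            = (si + 1, cm + 1, r ++ [i], ms + i) := by
          unfold thiefStepA; rw [if_pos hik, if_pos hcap]
        rw [hstep]; simp only [thiefPick]; rw [if_neg hnb]
        simp only [thiefCost, if_pos hik]
        rw [if_pos (show (1:Int) ≤ m - cm by omega)]
        obtain ⟨h1, h2⟩ := ih (si + 1) (cm + 1) (r ++ [i]) (ms + i)
        rw [show n - si - 1 = n - (si + 1) by ring, show m - cm - 1 = m - (cm + 1) by ring]
        constructor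
        · rw [h1]; simp
        · rw [h2]; simp only [List.sum_cons]; ring
      · have hki : k < i := by omega
        simp only [thiefPick]; rw [if_neg hnb]
        simp only [thiefCost, if_neg hik]
        by_cases hdvd : k ∣ i
        · obtain ⟨q, hq⟩ := hdvd
          have hq1 : 1 < q := by nlinarith
          have hfq : PySem.Int.floordiv i k = q := by
            rw [PySem.Int.floordiv_eq_ediv_of_pos (by omega), hq,
              Int.mul_ediv_cancel_left _ (by omega)]
          have hmod : PySem.Int.mod i k = 0 := (PySem.Int.mod_eq_zero_iff_dvd i k).mpr ⟨q, hq⟩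
          rw [if_pos hmod]
          simp only [hfq]
          by_cases hfit : q ≤ m - cm
          · -- affordable multiple of k: both take it
            have hstep : thiefStepA n m k (si, cm, r, ms) i
                = (si + 1, cm + q, r ++ [i], ms + i) := by
              unfold thiefStepA
              rw [if_neg hik, if_pos hcap]
              simp only [thiefInner_hits0 i k (m - cm) q hk hq (by omega) hfit]
              rw [if_pos (by omega)]
            rw [hstep, if_pos hfit]
            obtain ⟨h1, h2⟩ := ih (si + 1) (cm + q) (r ++ [i]) (ms + i)
            rw [show n - si - 1 = n - (si + 1) by ring, show m - cm - q = m - (cm + q) by ring]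
            constructor
            · rw [h1]; simp
            · rw [h2]; simp only [List.sum_cons]; ring
          · -- too many trips needed: both skip
            have hstep : thiefStepA n m k (si, cm, r, ms) i = (si, cm, r, ms) := by
              unfold thiefStepA
              rw [if_neg hik, if_pos hcap]
              obtain ⟨heq, hle⟩ := thiefInner_invariant0 i k (m - cm) (by omega)
              rw [heq]
              have htq : (thiefInner i k (m - cm) 0 0).2 < q := by omega
              have hlt : k * (thiefInner i k (m - cm) 0 0).2 < i := by
                nlinarith [mul_lt_mul_of_pos_left htq (show (0:Int) < k by omega)]
              rw [if_neg (by omega)]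
            rw [hstep, if_neg hfit]
            exact ih si cm r ms
        · -- not a multiple of k: both skip
          have hmod : ¬ PySem.Int.mod i k = 0 := by
            rw [PySem.Int.mod_eq_zero_iff_dvd]; exact hdvd
          rw [if_neg hmod]
          have hstep : thiefStepA n m k (si, cm, r, ms) i = (si, cm, r, ms) := by
            unfold thiefStepA
            rw [if_neg hik, if_pos hcap]
            obtain ⟨heq, _⟩ := thiefInner_invariant0 i k (m - cm) (by omega)
            rw [heq]
            have hne : i - k * (thiefInner i k (m - cm) 0 0).2 ≠ 0 := fun h =>
              hdvd ⟨(thiefInner i k (m - cm) 0 0).2, by omega⟩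
            rw [if_neg hne]
          rw [hstep]
          exact ih si cm r ms
    · -- budgets exhausted: A's step is the identity, B's pick breaks to []
      have hstep : thiefStepA n m k (si, cm, r, ms) i = (si, cm, r, ms) := by
        unfold thiefStepA
        split <;> rfl
      have hb : n - si ≤ 0 ∨ m - cm ≤ 0 := by omega
      rw [hstep]; simp only [thiefPick]; rw [if_pos hb]
      obtain ⟨h1, h2⟩ := ih si cm r ms
      rw [thiefPick_exhausted _ _ _ hb] at h1 h2
      exact ⟨h1, h2⟩

-- ===== VERDICT (by name: the statement is the Claim_ definition above) =====
theorem thief_spec : Claim_equal_thief := by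
  intro a n m k _ hk
  unfold Spec_thief thief thief_alt
  obtain ⟨h1, h2⟩ := foldA_pick n m k hk a 0 0 [] 0
  simp only [sub_zero] at h1 h2
  simp only [h1, h2, List.nil_append, zero_add]
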